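-- pv_equiv track=rewrite | github.com/UraniumX92/Encryptify | encsite/image/utils.py | split_and_flip
-- ===== SOURCE A (Python) =====
-- def split_and_flip(array:list):
--     """
--     divides the list into 2 halves and flips each half, joins the flipped halves and returns single list
--     does the same thing with each half recursively if the list contains even number of items/
--     because array with odd number items cannot be split and obtained back in original form. where as array with even number items
--     can be split recursively and can be obtained as original form of array.
--
--     :param array: list
--     :return: list - modified
--     """
--     size = len(array)
--     halfsize_int = size // 2
--     h1 = array[:halfsize_int]
--     h2 = array[halfsize_int:]
--     s1 = halfsize_int
--     s2 = size - halfsize_int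
--     # first half
--     if s1%2==0:
--         h1 = split_and_flip(h1)
--     # second half
--     if s2%2==0:
--         h2 = split_and_flip(h2)
--     return h1[::-1] + h2[::-1]
-- ===== SOURCE B (Python) =====
-- def split_and_flip(array: list):
--     """Iterative divide-and-conquer: walk the segment tree with an explicit
--     stack of (lo, hi, flag) half-segments and emit leaf slices directly;
--     the orientation flag alternates per level, so only odd leaves are ever
--     reversed and no intermediate list is reversed or concatenated."""
--     n = len(array)
--     if n < 2:
--         return array[:]
--     out = []
--     # seed with the two halves of the root (the root always splits)
--     stack = [(n // 2, n, False), (0, n // 2, False)]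
--     while stack:
--         lo, hi, fl = stack.pop()
--         size = hi - lo
--         if size < 2 or size % 2 == 1:
--             seg = array[lo:hi]
--             out += seg if fl else seg[::-1]
--         else:
--             mid = lo + size // 2
--             kids = [(lo, mid), (mid, hi)]
--             if not fl:
--                 kids.reverse()
--             for a, b in reversed(kids):  # push so the first kid pops first
--                 stack.append((a, b, not fl))
--     return out
-- ===== Notes on version B (the rewrite author's own statement) =====
-- stated objective: alternative
-- what changed: Replaces A's recursion (which reverses every recursively processed half) by an iterative explicit-stack walk over (lo, hi, flag) segments with an alternating orientation flag, emitting each leaf slice directly (reversed or not) into the output with no reversal or concatenation of intermediate results.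
import Mathlib
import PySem

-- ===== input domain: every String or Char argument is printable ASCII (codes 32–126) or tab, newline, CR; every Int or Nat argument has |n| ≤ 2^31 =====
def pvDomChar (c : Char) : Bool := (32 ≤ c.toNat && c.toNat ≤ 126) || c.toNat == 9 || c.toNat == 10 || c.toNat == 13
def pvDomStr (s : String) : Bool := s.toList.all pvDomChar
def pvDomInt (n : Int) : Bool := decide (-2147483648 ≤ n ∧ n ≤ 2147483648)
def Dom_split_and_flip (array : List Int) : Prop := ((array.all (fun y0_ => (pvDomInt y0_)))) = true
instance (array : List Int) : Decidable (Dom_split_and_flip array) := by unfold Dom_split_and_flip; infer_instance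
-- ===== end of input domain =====

-- B replaces A's recursion (which reverses every recursive result) by an iterative
-- explicit-stack walk of the segment tree with an orientation flag, emitting each leaf
-- slice directly (objective: alternative decomposition, no intermediate reversals).

-- ===== PORT A =====
-- fuel is only a totality guard: Python recurses forever (RecursionError) when
-- len(array) < 2, and length+1 bounds the recursion depth whenever it returns.
def splitFlipGo : Nat → List Int → List Int
  | 0, _ => []
  | fuel+1, a =>
    let size := a.length
    let halfsize_int := size / 2            -- size // 2 (nonneg, exact)
    let h1 := a.take halfsize_int           -- array[:halfsize_int]
    let h2 := a.drop halfsize_int           -- array[halfsize_int:]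
    let s1 := halfsize_int
    let s2 := size - halfsize_int
    let h1 := if s1 % 2 = 0 then splitFlipGo fuel h1 else h1
    let h2 := if s2 % 2 = 0 then splitFlipGo fuel h2 else h2
    h1.reverse ++ h2.reverse                -- h1[::-1] + h2[::-1]

def split_and_flip (array : List Int) : List Int :=
  splitFlipGo (array.length + 1) array

-- ===== PORT B =====
-- stack represented head-as-top (Python appends/pops at the end); fuel is only a
-- totality guard for the while loop (n*n+2 bounds the number of iterations).
-- Entries (lo, hi, fl) always satisfy lo ≤ hi ≤ len, so array[lo:hi] = (drop lo).take (hi-lo) exactly.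
def sfLoop (array : List Int) : Nat → List Int → List (Nat × Nat × Bool) → List Int
  | _, out, [] => out
  | 0, out, _ :: _ => out
  | fuel+1, out, (lo, hi, fl) :: rest =>
    let size := hi - lo
    if size < 2 ∨ size % 2 = 1 then
      let seg := (array.drop lo).take size                      -- array[lo:hi]
      sfLoop array fuel (out ++ (if fl then seg else seg.reverse)) rest
    else
      let mid := lo + size / 2
      let kids := [(lo, mid), (mid, hi)]
      let kids := if !fl then kids.reverse else kids
      -- for a, b in reversed(kids): stack.append((a, b, not fl))
      sfLoop array fuel out (kids.reverse.foldl (fun st p => (p.1, p.2, !fl) :: st) rest)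

def split_and_flip_alt (array : List Int) : List Int :=
  let n := array.length
  if n < 2 then array
  else sfLoop array (n * n + 2) [] [(0, n / 2, false), (n / 2, n, false)]

-- ===== PRECONDITION & SPEC =====
-- Pre_ excludes exactly lists of length 0 or 1, on which Python A recurses forever
-- on the empty even half and raises RecursionError.
def Pre_split_and_flip (array : List Int) : Prop := 2 ≤ array.length
instance (array : List Int) : Decidable (Pre_split_and_flip array) := by
  unfold Pre_split_and_flip; infer_instance
def pvWitness_split_and_flip : List Int := [1, 2]

def Spec_split_and_flip (array : List Int) (out : List Int) : Prop := out = split_and_flip_alt array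
instance (array : List Int) (out : List Int) : Decidable (Spec_split_and_flip array out) := by
  unfold Spec_split_and_flip; infer_instance

-- ===== CLAIM (what is proved, stated in full; the proofs are below) =====
def Claim_equal_split_and_flip : Prop := ∀ (array : List Int), Dom_split_and_flip array → Pre_split_and_flip array → Spec_split_and_flip array (split_and_flip array)

-- ===== LEMMAS AND PROOFS =====

-- A's recursion as a well-founded function on lists.
def Fspec (x : List Int) : List Int :=
  if h : x.length < 2 then x
  else
    let m := x.length / 2
    let h1 := if m % 2 = 0 then Fspec (x.take m) else x.take m
    let h2 := if (x.length - m) % 2 = 0 then Fspec (x.drop m) else x.drop m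
    h1.reverse ++ h2.reverse
termination_by x.length
decreasing_by
  · simp only [List.length_take]; omega
  · simp only [List.length_drop]; omega

-- B's denotation of a segment with an orientation flag.
def Eflag (x : List Int) (fl : Bool) : List Int :=
  if h : x.length < 2 ∨ x.length % 2 = 1 then (if fl then x else x.reverse)
  else
    let m := x.length / 2
    if fl then Eflag (x.take m) false ++ Eflag (x.drop m) false
    else Eflag (x.drop m) true ++ Eflag (x.take m) true
termination_by x.length
decreasing_by
  · simp only [List.length_take]; omega
  · simp only [List.length_drop]; omega
  · simp only [List.length_drop]; omega
  · simp only [List.length_take]; omega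

lemma splitFlipGo_eq_Fspec : ∀ (fuel : Nat) (x : List Int),
    2 ≤ x.length → x.length ≤ fuel → splitFlipGo fuel x = Fspec x := by
  intro fuel
  induction fuel with
  | zero => intro x h2 hf; omega
  | succ fuel ih =>
    intro x h2 hf
    have hm1 : 1 ≤ x.length / 2 := by omega
    have hlt : (x.take (x.length / 2)).length = x.length / 2 := by
      simp [List.length_take]; omega
    have hld : (x.drop (x.length / 2)).length = x.length - x.length / 2 := by
      simp [List.length_drop]
    have e1 : (if x.length / 2 % 2 = 0 then splitFlipGo fuel (x.take (x.length / 2)) else x.take (x.length / 2))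
            = (if x.length / 2 % 2 = 0 then Fspec (x.take (x.length / 2)) else x.take (x.length / 2)) := by
      by_cases hp : x.length / 2 % 2 = 0
      · rw [if_pos hp, if_pos hp, ih _ (by rw [hlt]; omega) (by rw [hlt]; omega)]
      · rw [if_neg hp, if_neg hp]
    have e2 : (if (x.length - x.length / 2) % 2 = 0 then splitFlipGo fuel (x.drop (x.length / 2)) else x.drop (x.length / 2))
            = (if (x.length - x.length / 2) % 2 = 0 then Fspec (x.drop (x.length / 2)) else x.drop (x.length / 2)) := by
      by_cases hp : (x.length - x.length / 2) % 2 = 0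
      · rw [if_pos hp, if_pos hp, ih _ (by rw [hld]; omega) (by rw [hld]; omega)]
      · rw [if_neg hp, if_neg hp]
    rw [show splitFlipGo (fuel + 1) x
        = (if x.length / 2 % 2 = 0 then splitFlipGo fuel (x.take (x.length / 2)) else x.take (x.length / 2)).reverse
          ++ (if (x.length - x.length / 2) % 2 = 0 then splitFlipGo fuel (x.drop (x.length / 2)) else x.drop (x.length / 2)).reverse
        from rfl]
    rw [e1, e2]
    conv_rhs => rw [Fspec]
    rw [dif_neg (by omega)]

lemma Eflag_eq_Fspec : ∀ (x : List Int), x.length % 2 = 0 →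
    Eflag x true = Fspec x ∧ Eflag x false = (Fspec x).reverse := by
  intro x
  induction hn : x.length using Nat.strong_induction_on generalizing x with
  | _ n ih =>
    subst hn
    intro hev
    by_cases hsmall : x.length < 2
    · interval_cases h : x.length
      · have hx : x = [] := List.eq_nil_of_length_eq_zero h
        subst hx; constructor <;> rw [Eflag, Fspec] <;> simp
      · omega
    · have h2 : 2 ≤ x.length := by omega
      have hm1 : 1 ≤ x.length / 2 := by omega
      set m := x.length / 2 with hm
      have hlt : (x.take m).length = m := by simp [List.length_take]; omega
      have hld : (x.drop m).length = x.length - m := by simp [List.length_drop]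
      have hmev : m % 2 = (x.length - m) % 2 := by omega
      have hFs : Fspec x =
          (if m % 2 = 0 then Fspec (x.take m) else x.take m).reverse ++
          (if (x.length - m) % 2 = 0 then Fspec (x.drop m) else x.drop m).reverse := by
        rw [Fspec]; rw [dif_neg (by omega)]
      have hreca : ∀ fl', Eflag (x.take m) fl' =
          (if m % 2 = 0 then (if fl' then Fspec (x.take m) else (Fspec (x.take m)).reverse)
           else (if fl' then x.take m else (x.take m).reverse)) := by
        intro fl'
        by_cases hp : m % 2 = 0
        · have := ih m (by omega) (x.take m) hlt (by omega)
          rw [if_pos hp]; cases fl' <;> simp [this.1, this.2]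
        · rw [if_neg hp, Eflag, dif_pos (by omega)]
      have hrecb : ∀ fl', Eflag (x.drop m) fl' =
          (if (x.length - m) % 2 = 0 then (if fl' then Fspec (x.drop m) else (Fspec (x.drop m)).reverse)
           else (if fl' then x.drop m else (x.drop m).reverse)) := by
        intro fl'
        by_cases hp : (x.length - m) % 2 = 0
        · have := ih (x.length - m) (by omega) (x.drop m) hld (by omega)
          rw [if_pos hp]; cases fl' <;> simp [this.1, this.2]
        · rw [if_neg hp, Eflag, dif_pos (by omega)]
      constructor
      · rw [Eflag, dif_neg (by omega), if_pos rfl]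
        rw [hreca false, hrecb false, hFs]
        by_cases hp : m % 2 = 0 <;> by_cases hq : (x.length - m) % 2 = 0 <;>
          simp_all
      · rw [Eflag, dif_neg (by omega)]
        simp only [if_neg (Bool.false_ne_true)]
        rw [hreca true, hrecb true, hFs]
        by_cases hp : m % 2 = 0 <;> by_cases hq : (x.length - m) % 2 = 0 <;>
          simp_all

-- weight function bounding the number of loop iterations
def pvW (stack : List (Nat × Nat × Bool)) : Nat :=
  (stack.map (fun e => (e.2.1 - e.1) * (e.2.1 - e.1) + 1)).sum

def pvDenote (array : List Int) (stack : List (Nat × Nat × Bool)) : List Int :=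
  (stack.map (fun e => Eflag ((array.drop e.1).take (e.2.1 - e.1)) e.2.2)).flatten

lemma sfLoop_correct (array : List Int) : ∀ (fuel : Nat) (stack : List (Nat × Nat × Bool)) (out : List Int),
    (∀ e ∈ stack, e.1 ≤ e.2.1 ∧ e.2.1 ≤ array.length) →
    pvW stack ≤ fuel →
    sfLoop array fuel out stack = out ++ pvDenote array stack := by
  intro fuel
  induction fuel with
  | zero =>
    intro stack out hb hw
    cases stack with
    | nil => simp [sfLoop, pvDenote]
    | cons e rest => simp [pvW] at hw
  | succ fuel ih =>
    intro stack out hb hw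
    cases stack with
    | nil => simp [sfLoop, pvDenote]
    | cons e rest =>
      obtain ⟨lo, hi, fl⟩ := e
      have hbe := hb (lo, hi, fl) (by simp)
      have hlohi : lo ≤ hi := hbe.1
      have hhilen : hi ≤ array.length := hbe.2
      have hseglen : ((array.drop lo).take (hi - lo)).length = hi - lo := by
        simp [List.length_take, List.length_drop]; omega
      simp only [sfLoop]
      by_cases hleaf : hi - lo < 2 ∨ (hi - lo) % 2 = 1
      · rw [if_pos hleaf]
        rw [ih rest _ (fun e he => hb e (by simp [he])) (by simp [pvW] at hw ⊢; omega)]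
        have hE : Eflag ((array.drop lo).take (hi - lo)) fl =
            (if fl then (array.drop lo).take (hi - lo) else ((array.drop lo).take (hi - lo)).reverse) := by
          rw [Eflag, dif_pos (by rw [hseglen]; exact hleaf)]
        simp [pvDenote, hE, List.append_assoc]
      · rw [if_neg hleaf]
        push_neg at hleaf
        have h2 : 2 ≤ hi - lo := by omega
        have hev : (hi - lo) % 2 = 0 := by omega
        set s := hi - lo with hs
        have hm1 : 1 ≤ s / 2 := by omega
        have hmlt : s / 2 < s := by omega
        set mid := lo + s / 2 with hmid
        -- the two pushed stacks, by fl
        have hkids : (if !fl then [(lo, mid), (mid, hi)].reverse else [(lo, mid), (mid, hi)]).reverse.foldl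
              (fun st p => (p.1, p.2, !fl) :: st) rest =
            (if fl then [(lo, mid, !fl), (mid, hi, !fl)] else [(mid, hi, !fl), (lo, mid, !fl)]) ++ rest := by
          cases fl <;> simp [List.foldl]
        rw [hkids]
        have hbnd : ∀ e ∈ (if fl then [(lo, mid, !fl), (mid, hi, !fl)] else [(mid, hi, !fl), (lo, mid, !fl)]) ++ rest,
            e.1 ≤ e.2.1 ∧ e.2.1 ≤ array.length := by
          intro e he
          rw [List.mem_append] at he
          rcases he with he | he
          · cases fl <;> simp at he <;> rcases he with he | he <;> subst he <;>
              constructor <;> simp [hmid] <;> omega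
          · exact hb e (by simp [he])
        have hwn : pvW ((if fl then [(lo, mid, !fl), (mid, hi, !fl)] else [(mid, hi, !fl), (lo, mid, !fl)]) ++ rest) ≤ fuel := by
          have hab : s / 2 + (s - s / 2) = s := by omega
          have hgrow : (s / 2) * (s / 2) + (s - s / 2) * (s - s / 2) + 3 ≤ s * s + 1 := by
            have h1 : 1 ≤ s / 2 := hm1
            have h2' : 1 ≤ s - s / 2 := by omega
            nlinarith [hab]
          have hm1' : mid - lo = s / 2 := by omega
          have hm2' : hi - mid = s - s / 2 := by omega
          have hw' : (hi - lo) * (hi - lo) + 1 + pvW rest ≤ fuel + 1 := by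
            simp only [pvW, List.map_cons, List.sum_cons] at hw ⊢
            linarith [hw]
          have hss : (hi - lo) * (hi - lo) = s * s := by rw [← hs]
          rw [hss] at hw'
          have hrest : (List.map (fun e => (e.2.1 - e.1) * (e.2.1 - e.1) + 1) rest).sum = pvW rest := rfl
          cases fl <;>
            simp only [pvW, List.map_append, List.sum_append, List.map_cons, List.sum_cons,
              List.map_nil, List.sum_nil, if_true, if_false, Bool.false_eq_true, hm1', hm2'] <;>
            linarith [hgrow, hw', hrest]
        rw [ih _ _ hbnd hwn]
        -- denotation of the segment splits as the two child segments
        have htake : ((array.drop lo).take s).take (s / 2) = (array.drop lo).take (s / 2) := by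
          rw [List.take_take]; congr 1; omega
        have hdrop : ((array.drop lo).take s).drop (s / 2) = (array.drop mid).take (hi - mid) := by
          rw [List.drop_take, List.drop_drop]
          congr 1 <;> omega
        have hseg1 : (array.drop lo).take (mid - lo) = ((array.drop lo).take s).take (s / 2) := by
          rw [htake]; congr 1; omega
        have hE : Eflag ((array.drop lo).take s) fl =
            (if fl then Eflag ((array.drop lo).take (mid - lo)) false ++ Eflag ((array.drop mid).take (hi - mid)) false
             else Eflag ((array.drop mid).take (hi - mid)) true ++ Eflag ((array.drop lo).take (mid - lo)) true) := by
          rw [Eflag, dif_neg (by rw [hseglen]; omega)]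
          have hm : ((array.drop lo).take s).length / 2 = s / 2 := by rw [hseglen]
          rw [hseg1, ← hdrop, hm]
        cases fl <;> simp [pvDenote, ← hs, hE, List.append_assoc]

-- root assembly: A's value is the concatenation of the two seeded segment denotations
lemma Fspec_root (x : List Int) (h2 : 2 ≤ x.length) :
    Fspec x = Eflag (x.take (x.length / 2)) false ++ Eflag (x.drop (x.length / 2)) false := by
  set m := x.length / 2 with hm
  have hm1 : 1 ≤ m := by omega
  have hlt : (x.take m).length = m := by simp [List.length_take]; omega
  have hld : (x.drop m).length = x.length - m := by simp [List.length_drop]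
  have hFs : Fspec x =
      (if m % 2 = 0 then Fspec (x.take m) else x.take m).reverse ++
      (if (x.length - m) % 2 = 0 then Fspec (x.drop m) else x.drop m).reverse := by
    rw [Fspec]; rw [dif_neg (by omega)]
  have h1 : Eflag (x.take m) false = (if m % 2 = 0 then Fspec (x.take m) else x.take m).reverse := by
    by_cases hp : m % 2 = 0
    · rw [if_pos hp]; exact ((Eflag_eq_Fspec (x.take m)) (by omega)).2
    · rw [if_neg hp, Eflag, dif_pos (by omega)]; simp
  have h2' : Eflag (x.drop m) false = (if (x.length - m) % 2 = 0 then Fspec (x.drop m) else x.drop m).reverse := by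
    by_cases hp : (x.length - m) % 2 = 0
    · rw [if_pos hp]; exact ((Eflag_eq_Fspec (x.drop m)) (by omega)).2
    · rw [if_neg hp, Eflag, dif_pos (by omega)]; simp
  rw [hFs, h1, h2']

-- ===== VERDICT =====
theorem split_and_flip_spec : Claim_equal_split_and_flip := by
  intro array _ hpre
  unfold Pre_split_and_flip at hpre
  unfold Spec_split_and_flip split_and_flip split_and_flip_alt
  set n := array.length with hn
  rw [if_neg (by omega)]
  rw [splitFlipGo_eq_Fspec (n + 1) array hpre (by omega)]
  rw [sfLoop_correct array (n * n + 2) _ []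
    (by intro e he; simp at he; rcases he with he | he <;> subst he <;> constructor <;> simp <;> omega)
    (by
      have hab : n / 2 + (n - n / 2) = n := by omega
      have hb2 : n / 2 * (n / 2) + (n - n / 2) * (n - n / 2) ≤ n * n := by
        have hexp : (n / 2 + (n - n / 2)) * (n / 2 + (n - n / 2))
            = n / 2 * (n / 2) + 2 * (n / 2 * (n - n / 2)) + (n - n / 2) * (n - n / 2) := by ring
        rw [hab] at hexp
        linarith [Nat.zero_le (n / 2 * (n - n / 2))]
      simp only [pvW, List.map_cons, List.map_nil, List.sum_cons, List.sum_nil, Nat.sub_zero]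
      linarith [hb2])]
  have hdrop0 : (array.drop 0).take (n / 2 - 0) = array.take (n / 2) := by simp
  have hdropm : (array.drop (n / 2)).take (n - n / 2) = array.drop (n / 2) := by
    apply List.take_of_length_le; simp [List.length_drop]; omega
  simp only [pvDenote, List.map_cons, List.map_nil, List.flatten_cons, List.flatten_nil,
    List.append_nil, List.nil_append, hdrop0, hdropm]
  exact Fspec_root array hpre
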